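-- pv_equiv track=rewrite | github.com/gh0stintheshe11/LeetCode-Solutions | solutions/2019.the-score-of-students-solving-math-expression/Python3.py | scoreOfStudents
-- ===== SOURCE A (Python) =====
-- from typing import List
--
-- def scoreOfStudents(s: str, answers: List[int]) -> int:
--     def evaluate_correct(expr):
--         # For evaluating correct expression as per precedence: * first then +
--         operand_stack, operator = [], []
--         current_num = 0
--
--         for char in expr + "+":
--             if char.isdigit():
--                 current_num = current_num * 10 + int(char)
--             else:
--                 if operator and operator[-1] == '*':
--                     operand_stack[-1] *= current_num
--                     operator.pop()
--                 else:
--                     operand_stack.append(current_num)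
--                 current_num = 0
--                 operator.append(char)
--
--         result = operand_stack[0]
--         for i in range(1, len(operand_stack)):
--             result += operand_stack[i]
--         return result
--
--     def evaluate_dummy(expr, l, r):
--         if (l, r) in memo:
--             return memo[(l, r)]
--
--         if l == r:
--             return {int(expr[l])}
--
--         result_set = set()
--         for k in range(l + 1, r, 2):
--             left_results = evaluate_dummy(expr, l, k - 1)
--             right_results = evaluate_dummy(expr, k + 1, r)
--             op = expr[k]
--
--             for lv in left_results:
--                 for rv in right_results:
--                     if op == '+':
--                         value = lv + rv
--                     elif op == '*':
--                         value = lv * rv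
--                     if value <= 1000:
--                         result_set.add(value)
--
--         memo[(l, r)] = result_set
--         return result_set
--
--     correct_answer = evaluate_correct(s)
--     memo = {}
--     possible_wrong_answers = evaluate_dummy(s, 0, len(s) - 1)
--
--     total_score = 0
--
--     for ans in answers:
--         if ans == correct_answer:
--             total_score += 5
--         elif ans in possible_wrong_answers:
--             total_score += 2
--
--     return total_score
-- ===== SOURCE B (Python) =====
-- from typing import List
--
-- def scoreOfStudents(s: str, answers: List[int]) -> int:
--     n = len(s)
--     # correct value: one stackless pass, running sum + pending product + current number
--     total = prod = cur = 0
--     mul, first = False, True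
--     for c in s + '+':
--         if c.isdigit():
--             cur = cur * 10 + int(c)
--         else:
--             if mul:
--                 prod *= cur
--             elif first:
--                 prod = cur
--                 first = False
--             else:
--                 total += prod
--                 prod = cur
--             cur = 0
--             mul = (c == '*')
--     correct = total + prod
--     # achievable values under any parenthesization, by a bottom-up interval DP.
--     # A well-formed expression (digit, op, digit, ..., digit) has odd length;
--     # an even-length string is no expression, so nothing is achievable.
--     wrong = set()
--     if n % 2:
--         dp = {}
--         for i in range(0, n, 2):
--             dp[(i, i)] = {int(s[i])}
--         for length in range(2, n, 2):
--             for l in range(0, n - length, 2):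
--                 r = l + length
--                 cur_set = set()
--                 for k in range(l + 1, r, 2):
--                     op = s[k]
--                     for lv in dp[(l, k - 1)]:
--                         for rv in dp[(k + 1, r)]:
--                             v = lv + rv if op == '+' else lv * rv
--                             if v <= 1000:
--                                 cur_set.add(v)
--                 dp[(l, r)] = cur_set
--         wrong = dp[(0, n - 1)]
--     score = 0
--     for a in answers:
--         if a == correct:
--             score += 5
--         elif a in wrong:
--             score += 2
--     return score
-- ===== Notes on version B (the rewrite author's own statement) =====
-- stated objective: alternative
-- what changed: The memoized top-down recursion over intervals becomes an explicit bottom-up DP table filled by increasing interval length (built only for odd-length strings, since a well-formed expression has odd length), and the stack-machine precedence evaluator becomes a stackless single pass keeping a running sum and a pending product.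
import Mathlib
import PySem

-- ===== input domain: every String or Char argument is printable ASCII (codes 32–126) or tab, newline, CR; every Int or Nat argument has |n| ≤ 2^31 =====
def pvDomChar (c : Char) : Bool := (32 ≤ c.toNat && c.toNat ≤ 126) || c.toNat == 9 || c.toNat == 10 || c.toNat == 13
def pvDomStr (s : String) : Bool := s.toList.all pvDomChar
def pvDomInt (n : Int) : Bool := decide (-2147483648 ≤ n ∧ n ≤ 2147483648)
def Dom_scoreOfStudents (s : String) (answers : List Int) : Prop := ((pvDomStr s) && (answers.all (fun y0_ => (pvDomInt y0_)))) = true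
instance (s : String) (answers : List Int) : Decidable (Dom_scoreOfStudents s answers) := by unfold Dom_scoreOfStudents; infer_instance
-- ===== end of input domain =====

-- B replaces A's memoized top-down recursion over intervals by a bottom-up DP table filled by
-- increasing interval length, and A's stack-machine precedence evaluator by a stackless single
-- pass with a running sum and a pending product (objective: alternative, same asymptotic cost).

-- int(c) for a single character c, as both Pythons apply it to s[i] (exact where c is a digit;
-- Python raises ValueError otherwise — such inputs are outside Pre_)
def pvDigitChar (c : Char) : Int := (PySem.Int.ofChars? [c]).getD 0

-- int(s[i]) at a (possibly out-of-range) index i; out of range Python raises — outside Pre_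
def pvDigit (cs : List Char) (i : Int) : Int := pvDigitChar (PySem.List.pyGetD cs i '0')

-- the inner double loop both Pythons share verbatim:
-- 'for lv in L: for rv in R: v = lv+rv if op=='+' else lv*rv; if v <= 1000: acc.add(v)'
-- (for an op other than '+'/'*' Python A raises NameError and B multiplies; outside Pre_ either way)
def pvComb (op : Char) (left right : List Int) (acc : PySem.Set Int) : PySem.Set Int :=
  left.foldl (fun a lv =>
    right.foldl (fun a rv =>
      let v := if op == '+' then lv + rv else lv * rv
      if v ≤ 1000 then PySem.Set.add a v else a) a) acc

-- ===== PORT A =====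
-- evaluate_correct's loop body; Python lists are kept head-at-the-top (operand_stack[-1] = head,
-- append = cons), which preserves every intermediate value; the final sum is extracted below.
def pvStepA (st : List Int × List Char × Int) (c : Char) : List Int × List Char × Int :=
  if PySem.Chars.isdigit c then (st.1, st.2.1, st.2.2 * 10 + pvDigitChar c)
  else
    match st.2.1 with
    | '*' :: opsRest =>
        ((match st.1 with
          | x :: t => (x * st.2.2) :: t
          | [] => []),   -- operand_stack[-1] on an empty stack raises IndexError; unreachable: a '*' on the operator stack implies a prior push
         c :: opsRest, 0)
    | ops => (st.2.2 :: st.1, c :: ops, 0)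

-- evaluate_correct(expr): fold the machine over expr + "+", then result = stack[0] + stack[1] + …
def pvEvalCorrectA (cs : List Char) : Int :=
  let fin := (cs ++ ['+']).foldl pvStepA ([], [], 0)
  match fin.1.reverse with
  | [] => 0          -- operand_stack[0] on an empty stack raises IndexError; unreachable (the final '+' always pushes)
  | x :: rest => rest.foldl (· + ·) x

-- evaluate_dummy(expr, l, r) with the memo dict threaded through explicitly;
-- the Nat argument is a totality guard (fuel): the top-level call supplies more than the
-- recursion depth ever needs, so it never runs out and the ported code is unchanged
def pvDummyA (cs : List Char) : Nat → Int → Int →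
    PySem.Dict (Int × Int) (PySem.Set Int) →
    PySem.Set Int × PySem.Dict (Int × Int) (PySem.Set Int)
  | 0, _, _, memo => (PySem.Set.empty, memo)
  | fuel + 1, l, r, memo =>
    match memo.get? (l, r) with
    | some v => (v, memo)
    | none =>
      if l = r then (PySem.Set.ofList [pvDigit cs l], memo)
      else
        let res := (PySem.List.pyRange (l + 1) r 2).foldl
          (fun (st : PySem.Set Int × PySem.Dict (Int × Int) (PySem.Set Int)) k =>
            let lr := pvDummyA cs fuel l (k - 1) st.2
            let rr := pvDummyA cs fuel (k + 1) r lr.2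
            (pvComb (PySem.List.pyGetD cs k '?') lr.1 rr.1 st.1, rr.2))
          (PySem.Set.empty, memo)
        (res.1, res.2.insert (l, r) res.1)

def scoreOfStudents (s : String) (answers : List Int) : Int :=
  let cs := s.toList
  let correct := pvEvalCorrectA cs
  let wrong := (pvDummyA cs (cs.length + 1) 0 (PySem.Chars.len cs - 1) PySem.Dict.empty).1
  answers.foldl (fun t a =>
    if a == correct then t + 5
    else if PySem.Set.contains wrong a then t + 2
    else t) 0

-- ===== PORT B =====
-- one stackless pass over s + '+': running sum, pending product, current number and two flags
-- (state = (total, prod, cur, mul, first))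
def pvStepB (st : Int × Int × Int × Bool × Bool) (c : Char) : Int × Int × Int × Bool × Bool :=
  if PySem.Chars.isdigit c then (st.1, st.2.1, st.2.2.1 * 10 + pvDigitChar c, st.2.2.2.1, st.2.2.2.2)
  else
    let tpf := if st.2.2.2.1 then (st.1, st.2.1 * st.2.2.1, st.2.2.2.2)
      else if st.2.2.2.2 then (st.1, st.2.2.1, false)
      else (st.1 + st.2.1, st.2.2.1, st.2.2.2.2)
    (tpf.1, tpf.2.1, 0, c == '*', tpf.2.2)

def pvCorrectB (cs : List Char) : Int :=
  let fin := (cs ++ ['+']).foldl pvStepB (0, 0, 0, false, true)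
  fin.1 + fin.2.1

-- bottom-up interval DP over all aligned intervals, by increasing length; computed only for
-- odd-length strings (a well-formed expression has odd length), otherwise nothing is achievable
def pvDpB (cs : List Char) (n : Int) : PySem.Dict (Int × Int) (PySem.Set Int) :=
  let dp0 := (PySem.List.pyRange 0 n 2).foldl
    (fun d i => d.insert (i, i) (PySem.Set.ofList [pvDigit cs i])) PySem.Dict.empty
  (PySem.List.pyRange 2 n 2).foldl (fun d len =>
    (PySem.List.pyRange 0 (n - len) 2).foldl (fun d l =>
      let r := l + len
      -- dp[(l, k-1)] / dp[(k+1, r)]: aligned shorter intervals, always present (getD is exact)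
      let cur := (PySem.List.pyRange (l + 1) r 2).foldl
        (fun a k => pvComb (PySem.List.pyGetD cs k '?')
          (d.getD (l, k - 1) PySem.Set.empty) (d.getD (k + 1, r) PySem.Set.empty) a)
        PySem.Set.empty
      d.insert (l, r) cur) d) dp0

def scoreOfStudents_alt (s : String) (answers : List Int) : Int :=
  let cs := s.toList
  let n := PySem.Chars.len cs
  let correct := pvCorrectB cs
  -- dp[(0, n-1)]: present for every odd n ≥ 1, so the plain indexing never raises (getD is exact)
  let wrong := if n % 2 = 1 then (pvDpB cs n).getD (0, n - 1) PySem.Set.empty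
    else PySem.Set.empty
  answers.foldl (fun t a =>
    if a == correct then t + 5
    else if PySem.Set.contains wrong a then t + 2
    else t) 0

-- ===== PRECONDITION & SPEC =====
-- a well-formed expression: digit (op digit)* with op ∈ {+, *}
def pvValidExpr : List Char → Bool
  | [] => false
  | [d] => PySem.Chars.isdigit d
  | d :: o :: rest => PySem.Chars.isdigit d && "+*".toList.contains o && pvValidExpr rest

-- Pre_ is the set of inputs on which Python A returns normally: well-formed expressions,
-- or even-length strings whose first length-3 characters form a well-formed expression
-- (there A's interval recursion bottoms out on empty split ranges and it scores against an
-- empty wrong-answer set); on every other string A raises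
-- (ValueError/UnboundLocalError/IndexError).  B is total, so no A-returning input is excluded.
def Pre_scoreOfStudents (s : String) (answers : List Int) : Prop :=
  pvValidExpr s.toList = true ∨
    (s.toList.length % 2 = 0 ∧
      (s.toList.length ≤ 2 ∨ pvValidExpr (s.toList.take (s.toList.length - 3)) = true))
instance (s : String) (answers : List Int) : Decidable (Pre_scoreOfStudents s answers) := by
  unfold Pre_scoreOfStudents; infer_instance

def pvWitness_scoreOfStudents : String × List Int := ("7", [7])

def Spec_scoreOfStudents (s : String) (answers : List Int) (out : Int) : Prop := out = scoreOfStudents_alt s answers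
instance (s : String) (answers : List Int) (out : Int) : Decidable (Spec_scoreOfStudents s answers out) := by unfold Spec_scoreOfStudents; infer_instance

-- ===== CLAIM (what is proved, stated in full; the proofs are below) =====
def Claim_equal_scoreOfStudents : Prop := ∀ (s : String) (answers : List Int), Dom_scoreOfStudents s answers → Pre_scoreOfStudents s answers → Spec_scoreOfStudents s answers (scoreOfStudents s answers)

-- ===== LEMMAS AND PROOFS =====

theorem pyRange_two_cons (a b : Int) (h : a < b) :
    PySem.List.pyRange a b 2 = a :: PySem.List.pyRange (a + 2) b 2 := by
  rw [PySem.List.pyRange_of_pos a b (by norm_num), PySem.List.pyRange_of_pos (a+2) b (by norm_num)]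
  have h1 : ((b - a + 2 - 1) / 2).toNat = (if a + 2 < b then ((b - (a+2) + 2 - 1) / 2).toNat else 0) + 1 := by
    split <;> omega
  simp only [if_pos h, h1, List.range_succ_eq_map, List.map_cons, List.map_map]
  refine List.cons_eq_cons.mpr ⟨by omega, ?_⟩
  apply List.map_congr_left; intro k _
  simp only [Function.comp_apply, Nat.succ_eq_add_one]
  push_cast; ring

theorem pyRange_two_nil (a b : Int) (h : b ≤ a) : PySem.List.pyRange a b 2 = [] := by
  rw [PySem.List.pyRange_of_pos _ _ (by norm_num : (0:Int) < 2), if_neg (by omega)]; simp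

-- the interval value function both dummy evaluators compute (fuel-indexed recursion,
-- with pvF the fuel-independent top version)
def pvFRec (cs : List Char) : Nat → Int → Int → PySem.Set Int
  | 0, _, _ => PySem.Set.empty
  | fuel + 1, l, r =>
    if l = r then PySem.Set.ofList [pvDigit cs l]
    else (PySem.List.pyRange (l + 1) r 2).foldl
      (fun a k => pvComb (PySem.List.pyGetD cs k '?') (pvFRec cs fuel l (k - 1)) (pvFRec cs fuel (k + 1) r) a)
      PySem.Set.empty

def pvF (cs : List Char) (l r : Int) : PySem.Set Int := pvFRec cs ((r - l).toNat + 1) l r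

theorem pvFRec_irrel (cs : List Char) :
    ∀ (f1 : Nat), ∀ (f2 : Nat) (l r : Int), (r - l).toNat < f1 → (r - l).toNat < f2 →
    pvFRec cs f1 l r = pvFRec cs f2 l r := by
  intro f1
  induction f1 with
  | zero => intro f2 l r h1 _; omega
  | succ f1 ih =>
    intro f2 l r h1 h2
    obtain ⟨f2', rfl⟩ : ∃ f2', f2 = f2' + 1 := ⟨f2 - 1, by omega⟩
    simp only [pvFRec]
    by_cases hlr : l = r
    · simp [hlr]
    · simp only [if_neg hlr]
      apply PySem.List.foldl_congr_mem
      intro acc k hk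
      have hb := (PySem.List.mem_pyRange_iff_of_pos (by norm_num) k).mp hk
      rw [ih f2' l (k - 1) (by omega) (by omega), ih f2' (k + 1) r (by omega) (by omega)]

theorem pvF_eq (cs : List Char) (l r : Int) :
    pvF cs l r = if l = r then PySem.Set.ofList [pvDigit cs l]
      else (PySem.List.pyRange (l + 1) r 2).foldl
        (fun a k => pvComb (PySem.List.pyGetD cs k '?') (pvF cs l (k - 1)) (pvF cs (k + 1) r) a)
        PySem.Set.empty := by
  conv_lhs => rw [pvF, pvFRec]
  by_cases hlr : l = r
  · simp [hlr]
  · simp only [if_neg hlr]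
    apply PySem.List.foldl_congr_mem
    intro acc k hk
    have hb := (PySem.List.mem_pyRange_iff_of_pos (by norm_num) k).mp hk
    rw [pvFRec_irrel cs ((r - l).toNat) (((k - 1) - l).toNat + 1) l (k - 1) (by omega) (by omega),
        pvFRec_irrel cs ((r - l).toNat) ((r - (k + 1)).toNat + 1) (k + 1) r (by omega) (by omega)]
    rfl

def pvMemoOK (cs : List Char) (m : PySem.Dict (Int × Int) (PySem.Set Int)) : Prop :=
  ∀ p v, m.get? p = some v → v = pvF cs p.1 p.2

theorem pvDummyA_F (cs : List Char) :
    ∀ (fuel : Nat) (l r : Int) (memo : PySem.Dict (Int × Int) (PySem.Set Int)),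
    (r - l).toNat < fuel → pvMemoOK cs memo →
    (pvDummyA cs fuel l r memo).1 = pvF cs l r ∧ pvMemoOK cs (pvDummyA cs fuel l r memo).2 := by
  intro fuel
  induction fuel with
  | zero => intro l r memo hd _; omega
  | succ fuel ih =>
  intro l r memo hd hok
  simp only [pvDummyA]
  cases hm : memo.get? (l, r) with
  | some v => exact ⟨hok _ _ hm, hok⟩
  | none =>
    by_cases hlr : l = r
    · simp only [if_pos hlr]
      refine ⟨?_, hok⟩
      rw [pvF_eq, if_pos hlr]
    · simp only [if_neg hlr]
      have key : ∀ (ks : List Int), (∀ k ∈ ks, k ∈ PySem.List.pyRange (l + 1) r 2) →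
          ∀ (acc : PySem.Set Int) (m : PySem.Dict (Int × Int) (PySem.Set Int)), pvMemoOK cs m →
          (ks.foldl
            (fun (st : PySem.Set Int × PySem.Dict (Int × Int) (PySem.Set Int)) k =>
              (pvComb (PySem.List.pyGetD cs k '?') (pvDummyA cs fuel l (k - 1) st.2).1
                 (pvDummyA cs fuel (k + 1) r (pvDummyA cs fuel l (k - 1) st.2).2).1 st.1,
               (pvDummyA cs fuel (k + 1) r (pvDummyA cs fuel l (k - 1) st.2).2).2)) (acc, m)).1 =
            ks.foldl (fun a k => pvComb (PySem.List.pyGetD cs k '?') (pvF cs l (k - 1)) (pvF cs (k + 1) r) a) acc ∧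
          pvMemoOK cs (ks.foldl
            (fun (st : PySem.Set Int × PySem.Dict (Int × Int) (PySem.Set Int)) k =>
              (pvComb (PySem.List.pyGetD cs k '?') (pvDummyA cs fuel l (k - 1) st.2).1
                 (pvDummyA cs fuel (k + 1) r (pvDummyA cs fuel l (k - 1) st.2).2).1 st.1,
               (pvDummyA cs fuel (k + 1) r (pvDummyA cs fuel l (k - 1) st.2).2).2)) (acc, m)).2 := by
        intro ks
        induction ks with
        | nil => intro _ acc m hm'; exact ⟨rfl, hm'⟩
        | cons k ks ihk =>
          intro hmem acc m hm'
          have hb := (PySem.List.mem_pyRange_iff_of_pos (by norm_num) k).mp (hmem k (by simp))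
          have h1 := ih l (k - 1) m (by omega) hm'
          have h2 := ih (k + 1) r (pvDummyA cs fuel l (k - 1) m).2 (by omega) h1.2
          simp only [List.foldl_cons]
          rw [h1.1, h2.1]
          exact ihk (fun x hx => hmem x (by simp [hx])) _ _ h2.2
      have hkey := key (PySem.List.pyRange (l + 1) r 2) (fun _ h => h) PySem.Set.empty memo hok
      refine ⟨?_, ?_⟩
      · rw [hkey.1, pvF_eq, if_neg hlr]
      · intro p v hp
        rcases eq_or_ne p (l, r) with h | h
        · subst h
          rw [PySem.Dict.get?_insert_self] at hp
          cases hp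
          rw [hkey.1, pvF_eq, if_neg hlr]
        · rw [PySem.Dict.get?_insert _ _ _ _, if_neg h] at hp
          exact hkey.2 _ _ hp

-- ===== B side =====
-- all entries created so far that matter: aligned intervals shorter than L are present
def pvInv (cs : List Char) (n L : Int) (dct : PySem.Dict (Int × Int) (PySem.Set Int)) : Prop :=
  ∀ a b : Int, 2 ∣ a → 2 ∣ (b - a) → 0 ≤ a → a ≤ b → b < n → b - a < L →
    dct.get? (a, b) = some (pvF cs a b)

theorem pvLeafB (cs : List Char) :
    ∀ (is : List Int) (dct : PySem.Dict (Int × Int) (PySem.Set Int)) (a b : Int),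
    ((is.foldl (fun d i => d.insert (i, i) (PySem.Set.ofList [pvDigit cs i])) dct).get? (a, b)) =
      if a = b ∧ a ∈ is then some (PySem.Set.ofList [pvDigit cs a]) else dct.get? (a, b) := by
  intro is
  induction is with
  | nil => intro dct a b; simp
  | cons i is ih =>
    intro dct a b
    simp only [List.foldl_cons]
    rw [ih]
    by_cases hab : a = b
    · subst hab
      by_cases hmem : a ∈ is
      · simp [hmem]
      · by_cases hai : a = i
        · subst hai
          simp [hmem, PySem.Dict.get?_insert_self]
        · rw [if_neg (by simp [hmem]), if_neg (by simp [hmem, hai])]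
          rw [PySem.Dict.get?_insert, if_neg (by simp [hai])]
    · rw [if_neg (by simp [hab]), if_neg (by simp [hab])]
      rw [PySem.Dict.get?_insert, if_neg (by intro h; exact hab (by injection h with h1 h2; omega))]

theorem pvCurB (cs : List Char) (n L l : Int)
    (dct : PySem.Dict (Int × Int) (PySem.Set Int))
    (hInv : pvInv cs n L dct) (hl2 : 2 ∣ l) (hl0 : 0 ≤ l) (hL2 : 2 ∣ L) (hLpos : 0 < L)
    (hr : l + L < n) :
    (PySem.List.pyRange (l + 1) (l + L) 2).foldl
      (fun a k => pvComb (PySem.List.pyGetD cs k '?')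
        (dct.getD (l, k - 1) PySem.Set.empty) (dct.getD (k + 1, l + L) PySem.Set.empty) a)
      PySem.Set.empty = pvF cs l (l + L) := by
  rw [pvF_eq, if_neg (by omega)]
  apply PySem.List.foldl_congr_mem
  intro acc k hk
  have hb := (PySem.List.mem_pyRange_iff_of_pos (by norm_num) k).mp hk
  have h1 : dct.getD (l, k - 1) PySem.Set.empty = pvF cs l (k - 1) := by
    rw [PySem.Dict.getD_of_get?_eq_some (v := pvF cs l (k - 1))]
    exact hInv l (k - 1) hl2 (by omega) hl0 (by omega) (by omega) (by omega)
  have h2 : dct.getD (k + 1, l + L) PySem.Set.empty = pvF cs (k + 1) (l + L) := by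
    rw [PySem.Dict.getD_of_get?_eq_some (v := pvF cs (k + 1) (l + L))]
    exact hInv (k + 1) (l + L) (by omega) (by omega) (by omega) (by omega) (by omega) (by omega)
  rw [h1, h2]

theorem pvRowB (cs : List Char) (n L : Int) (hL2 : 2 ∣ L) (hLpos : 0 < L) :
    ∀ (ls : List Int) (dct : PySem.Dict (Int × Int) (PySem.Set Int)),
    (∀ l ∈ ls, 2 ∣ l ∧ 0 ≤ l ∧ l + L < n) →
    pvMemoOK cs dct → pvInv cs n L dct →
    pvMemoOK cs (ls.foldl (fun d l =>
        d.insert (l, l + L) ((PySem.List.pyRange (l + 1) (l + L) 2).foldl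
          (fun a k => pvComb (PySem.List.pyGetD cs k '?')
            (d.getD (l, k - 1) PySem.Set.empty) (d.getD (k + 1, l + L) PySem.Set.empty) a)
          PySem.Set.empty)) dct) ∧
    pvInv cs n L (ls.foldl (fun d l =>
        d.insert (l, l + L) ((PySem.List.pyRange (l + 1) (l + L) 2).foldl
          (fun a k => pvComb (PySem.List.pyGetD cs k '?')
            (d.getD (l, k - 1) PySem.Set.empty) (d.getD (k + 1, l + L) PySem.Set.empty) a)
          PySem.Set.empty)) dct) ∧
    (∀ l ∈ ls, ((ls.foldl (fun d l =>
        d.insert (l, l + L) ((PySem.List.pyRange (l + 1) (l + L) 2).foldl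
          (fun a k => pvComb (PySem.List.pyGetD cs k '?')
            (d.getD (l, k - 1) PySem.Set.empty) (d.getD (k + 1, l + L) PySem.Set.empty) a)
          PySem.Set.empty)) dct).get? (l, l + L)).isSome) := by
  intro ls
  induction ls with
  | nil => intro dct _ hok hinv; exact ⟨hok, hinv, by simp⟩
  | cons l ls ih =>
    intro dct hcond hok hinv
    obtain ⟨hl2, hl0, hln⟩ := hcond l (by simp)
    have hcur := pvCurB cs n L l dct hinv hl2 hl0 hL2 hLpos hln
    simp only [List.foldl_cons]
    rw [hcur]
    have hok1 : pvMemoOK cs (dct.insert (l, l + L) (pvF cs l (l + L))) := by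
      intro p v hp
      rcases eq_or_ne p (l, l + L) with h | h
      · subst h; rw [PySem.Dict.get?_insert_self] at hp; cases hp; rfl
      · rw [PySem.Dict.get?_insert, if_neg h] at hp; exact hok _ _ hp
    have hinv1 : pvInv cs n L (dct.insert (l, l + L) (pvF cs l (l + L))) := by
      intro a b ha2 hab2 ha0 hab hbn hL'
      rw [PySem.Dict.get?_insert, if_neg (by intro h; injection h with h1 h2; omega)]
      exact hinv a b ha2 hab2 ha0 hab hbn hL'
    have hrest := ih (dct.insert (l, l + L) (pvF cs l (l + L)))
      (fun x hx => hcond x (by simp [hx])) hok1 hinv1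
    refine ⟨hrest.1, hrest.2.1, ?_⟩
    intro x hx
    rcases List.mem_cons.mp hx with h | h
    · subst h
      -- the entry for x survives the rest of the fold
      have hsome : ∀ (ms : List Int) (d0 : PySem.Dict (Int × Int) (PySem.Set Int)) (p : Int × Int),
          (d0.get? p).isSome →
          ((ms.foldl (fun d l =>
            d.insert (l, l + L) ((PySem.List.pyRange (l + 1) (l + L) 2).foldl
              (fun a k => pvComb (PySem.List.pyGetD cs k '?')
                (d.getD (l, k - 1) PySem.Set.empty) (d.getD (k + 1, l + L) PySem.Set.empty) a)
              PySem.Set.empty)) d0).get? p).isSome := by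
        intro ms
        induction ms with
        | nil => intro d0 p h; exact h
        | cons m ms ihm =>
          intro d0 p h
          simp only [List.foldl_cons]
          apply ihm
          rw [PySem.Dict.get?_insert]
          split
          · simp
          · exact h
      exact hsome ls _ _ (by rw [PySem.Dict.get?_insert_self]; simp)
    · exact hrest.2.2 x h

theorem pvOuterB (cs : List Char) (n : Int) :
    ∀ (m : Nat) (L : Int) (dct : PySem.Dict (Int × Int) (PySem.Set Int)),
    2 ∣ L → 0 < L → (n - L).toNat ≤ m →
    pvMemoOK cs dct → pvInv cs n L dct →
    pvInv cs n (max L n) ((PySem.List.pyRange L n 2).foldl (fun d len =>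
      (PySem.List.pyRange 0 (n - len) 2).foldl (fun d l =>
        d.insert (l, l + len) ((PySem.List.pyRange (l + 1) (l + len) 2).foldl
          (fun a k => pvComb (PySem.List.pyGetD cs k '?')
            (d.getD (l, k - 1) PySem.Set.empty) (d.getD (k + 1, l + len) PySem.Set.empty) a)
          PySem.Set.empty)) d) dct) := by
  intro m
  induction m with
  | zero =>
    intro L dct hL2 hL0 hm hok hinv
    rw [pyRange_two_nil _ _ (by omega), List.foldl_nil]
    intro a b ha2 hab2 ha0 hab hbn _
    exact hinv a b ha2 hab2 ha0 hab hbn (by omega)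
  | succ m ihm =>
    intro L dct hL2 hL0 hm hok hinv
    by_cases hLn : n ≤ L
    · rw [pyRange_two_nil _ _ hLn, List.foldl_nil]
      intro a b ha2 hab2 ha0 hab hbn _
      exact hinv a b ha2 hab2 ha0 hab hbn (by omega)
    · rw [pyRange_two_cons _ _ (by omega), List.foldl_cons]
      have hrow := pvRowB cs n L hL2 hL0 (PySem.List.pyRange 0 (n - L) 2) dct
        (fun l hl => by
          have := (PySem.List.mem_pyRange_iff_of_pos (by norm_num) l).mp hl
          exact ⟨by omega, by omega, by omega⟩) hok hinv
      have hinv2 : pvInv cs n (L + 2)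
          ((PySem.List.pyRange 0 (n - L) 2).foldl (fun d l =>
            d.insert (l, l + L) ((PySem.List.pyRange (l + 1) (l + L) 2).foldl
              (fun a k => pvComb (PySem.List.pyGetD cs k '?')
                (d.getD (l, k - 1) PySem.Set.empty) (d.getD (k + 1, l + L) PySem.Set.empty) a)
              PySem.Set.empty)) dct) := by
        intro a b ha2 hab2 ha0 hab hbn hL'
        by_cases hsm : b - a < L
        · exact hrow.2.1 a b ha2 hab2 ha0 hab hbn hsm
        · have hba : b - a = L := by omega
          have hmem : a ∈ PySem.List.pyRange 0 (n - L) 2 := by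
            rw [PySem.List.mem_pyRange_iff_of_pos (by norm_num)]
            refine ⟨by omega, by omega, by omega⟩
          have hsome := hrow.2.2 a hmem
          have hb' : b = a + L := by omega
          subst hb'
          obtain ⟨v, hv⟩ := Option.isSome_iff_exists.mp hsome
          rw [hv, hrow.1 _ _ hv]
      have hfin := ihm (L + 2) _ (by omega) (by omega) (by omega) hrow.1 hinv2
      intro a b ha2 hab2 ha0 hab hbn hb'
      exact hfin a b ha2 hab2 ha0 hab hbn (by omega)

-- ===== length of a well-formed expression =====
theorem pvValid_len : ∀ cs : List Char, pvValidExpr cs = true → cs.length % 2 = 1 := by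
  intro cs
  induction cs using pvValidExpr.induct with
  | case1 => intro h; simp [pvValidExpr] at h
  | case2 d => intro _; rfl
  | case3 d o rest ih =>
    intro h
    simp only [pvValidExpr, Bool.and_eq_true] at h
    have := ih h.2
    simp
    omega

-- ===== the correct value: A's stack machine vs B's stackless flag pass =====
def pvExtract (fin : List Int × List Char × Int) : Int :=
  match fin.1.reverse with
  | [] => 0
  | x :: rest => rest.foldl (· + ·) x

theorem pvExtract_sum (st : List Int × List Char × Int) (h : st.1 ≠ []) :
    pvExtract st = st.1.sum := by
  unfold pvExtract
  cases hrev : st.1.reverse with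
  | nil => exact absurd (by simpa using congrArg List.reverse hrev) h
  | cons x rest =>
    have hst : st.1 = (x :: rest).reverse := by rw [← hrev]; simp
    rw [hst]
    have hf : rest.foldl (· + ·) x = x + (rest.map (fun y => y)).sum :=
      PySem.List.foldl_add (g := fun y => y) rest x
    simp [hf]
    omega

-- machine state vs (total, prod, cur, mul, first)
def pvRel2 (st : List Int × List Char × Int) (fl : Int × Int × Int × Bool × Bool) : Prop :=
  fl.2.2.1 = st.2.2 ∧
  ( (fl.2.2.2.2 = true ∧ fl.2.2.2.1 = false ∧ st.1 = [] ∧ st.2.1 = [] ∧ fl.1 = 0 ∧ fl.2.1 = 0)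
  ∨ (fl.2.2.2.2 = false ∧ fl.2.2.2.1 = false ∧
      (∃ o rest, st.2.1 = o :: rest ∧ o ≠ '*') ∧ st.1 ≠ [] ∧ st.1.sum = fl.1 + fl.2.1)
  ∨ (fl.2.2.2.2 = false ∧ fl.2.2.2.1 = true ∧
      (∃ rest tl, st.2.1 = '*' :: rest ∧ st.1 = fl.2.1 :: tl ∧ tl.sum = fl.1)) )

theorem pvStepA_digit (st : List Int × List Char × Int) (c : Char)
    (h : PySem.Chars.isdigit c = true) :
    pvStepA st c = (st.1, st.2.1, st.2.2 * 10 + pvDigitChar c) := by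
  simp [pvStepA, h]

theorem pvStepA_op_nil (s : List Int) (cur : Int) (c : Char)
    (h : PySem.Chars.isdigit c = false) :
    pvStepA (s, [], cur) c = (cur :: s, [c], 0) := by
  simp [pvStepA, h]

theorem pvStepA_op_push (s : List Int) (o : Char) (rest : List Char) (cur : Int) (c : Char)
    (h : PySem.Chars.isdigit c = false) (ho : o ≠ '*') :
    pvStepA (s, o :: rest, cur) c = (cur :: s, c :: o :: rest, 0) := by
  simp only [pvStepA, h, Bool.false_eq_true, if_false]
  split
  next heq => injection heq with h1 h2; exact absurd h1 ho
  next => rfl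

theorem pvStepA_op_star (q : Int) (tl : List Int) (rest : List Char) (cur : Int) (c : Char)
    (h : PySem.Chars.isdigit c = false) :
    pvStepA (q :: tl, '*' :: rest, cur) c = ((q * cur) :: tl, c :: rest, 0) := by
  simp only [pvStepA, h, Bool.false_eq_true, if_false]

theorem pvStep2 (st : List Int × List Char × Int) (fl : Int × Int × Int × Bool × Bool)
    (c : Char) (h : pvRel2 st fl) : pvRel2 (pvStepA st c) (pvStepB fl c) := by
  obtain ⟨s, ops, cur⟩ := st
  obtain ⟨t, p, curb, mul, first⟩ := fl
  obtain ⟨hcur, hcase⟩ := h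
  simp only at hcur
  subst hcur
  by_cases hd : PySem.Chars.isdigit c = true
  · rw [pvStepA_digit _ _ hd]
    simp only [pvStepB, hd, if_true]
    exact ⟨rfl, hcase⟩
  · rw [Bool.not_eq_true] at hd
    simp only [pvStepB, hd, Bool.false_eq_true, if_false]
    rcases hcase with ⟨hf, hm, hs, ho, ht, hp⟩ | ⟨hf, hm, ⟨o, rest, ho, hne⟩, hs, hsum⟩ |
      ⟨hf, hm, ⟨rest, tl, ho, hs, hsum⟩⟩
    · -- first: stack and ops empty
      simp only at hs ho ht hp; subst hs; subst ho; subst ht; subst hp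
      simp only at hm hf; subst hm; subst hf
      rw [pvStepA_op_nil _ _ _ hd]
      simp only [Bool.false_eq_true, eq_self_iff_true, if_false, if_true]
      by_cases hc : (c == '*') = true
      · refine ⟨rfl, Or.inr (Or.inr ⟨rfl, by simp [hc], [], [], by rw [beq_iff_eq] at hc; rw [hc], rfl, rfl⟩)⟩
      · refine ⟨rfl, Or.inr (Or.inl ⟨rfl, by simp [hc], ⟨c, [], rfl, by simpa using hc⟩, by simp, by simp⟩)⟩
    · -- top operator is not '*'
      simp only at hm hf; subst hm; subst hf
      subst ho
      rw [pvStepA_op_push _ _ _ _ _ hd hne]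
      simp only [Bool.false_eq_true, eq_self_iff_true, if_false, if_true]
      by_cases hc : (c == '*') = true
      · refine ⟨rfl, Or.inr (Or.inr ⟨rfl, by simp [hc], o :: rest, s,
          by rw [beq_iff_eq] at hc; rw [hc], rfl, by simp only [List.sum_cons] at hsum ⊢; omega⟩)⟩
      · refine ⟨rfl, Or.inr (Or.inl ⟨rfl, by simp [hc], ⟨c, o :: rest, rfl, by simpa using hc⟩,
          by simp, by simp only [List.sum_cons] at hsum ⊢; omega⟩)⟩
    · -- top operator is '*'
      simp only at hm hf; subst hm; subst hf
      subst ho; subst hs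
      rw [pvStepA_op_star _ _ _ _ _ hd]
      simp only [Bool.false_eq_true, eq_self_iff_true, if_false, if_true]
      by_cases hc : (c == '*') = true
      · refine ⟨rfl, Or.inr (Or.inr ⟨rfl, by simp [hc], rest, tl,
          by rw [beq_iff_eq] at hc; rw [hc], rfl, hsum⟩)⟩
      · refine ⟨rfl, Or.inr (Or.inl ⟨rfl, by simp [hc], ⟨c, rest, rfl, by simpa using hc⟩,
          by simp, by simp only [List.sum_cons]; omega⟩)⟩

theorem pvFold2 : ∀ (cs : List Char) (st : List Int × List Char × Int)
    (fl : Int × Int × Int × Bool × Bool), pvRel2 st fl →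
    pvRel2 (cs.foldl pvStepA st) (cs.foldl pvStepB fl) := by
  intro cs
  induction cs with
  | nil => intro st fl h; exact h
  | cons c cs ih =>
    intro st fl h
    simp only [List.foldl_cons]
    exact ih _ _ (pvStep2 st fl c h)

theorem pvPlusStep (st : List Int × List Char × Int) (fl : Int × Int × Int × Bool × Bool)
    (h : pvRel2 st fl) :
    pvExtract (pvStepA st '+') = (pvStepB fl '+').1 + (pvStepB fl '+').2.1 := by
  obtain ⟨s, ops, cur⟩ := st
  obtain ⟨t, p, curb, mul, first⟩ := fl
  obtain ⟨hcur, hcase⟩ := h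
  simp only at hcur
  subst hcur
  have hplus : PySem.Chars.isdigit '+' = false := by decide
  simp only [pvStepB, hplus, Bool.false_eq_true, if_false]
  rcases hcase with ⟨hf, hm, hs, ho, ht, hp⟩ | ⟨hf, hm, ⟨o, rest, ho, hne⟩, hs, hsum⟩ |
    ⟨hf, hm, ⟨rest, tl, ho, hs, hsum⟩⟩
  · simp only at hs ho ht hp hm hf
    subst hs; subst ho; subst ht; subst hp; subst hm; subst hf
    rw [pvStepA_op_nil _ _ _ hplus, pvExtract_sum _ (by simp)]
    simp only [Bool.false_eq_true, eq_self_iff_true, if_false, if_true]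
    simp
  · simp only at hm hf; subst hm; subst hf; subst ho
    rw [pvStepA_op_push _ _ _ _ _ hplus hne, pvExtract_sum _ (by simp)]
    simp only [List.sum_cons, Bool.false_eq_true, eq_self_iff_true, if_false, if_true]
    simp only at hsum
    omega
  · simp only at hm hf; subst hm; subst hf; subst ho; subst hs
    rw [pvStepA_op_star _ _ _ _ _ hplus, pvExtract_sum _ (by simp)]
    simp only [List.sum_cons, Bool.false_eq_true, eq_self_iff_true, if_false, if_true]
    simp only at hsum
    rw [hsum]
    ring

theorem pvCorrect_eq (cs : List Char) : pvEvalCorrectA cs = pvCorrectB cs := by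
  show pvExtract ((cs ++ ['+']).foldl pvStepA ([], [], 0)) = pvCorrectB cs
  unfold pvCorrectB
  rw [List.foldl_append, List.foldl_append]
  simp only [List.foldl_cons, List.foldl_nil]
  exact pvPlusStep _ _ (pvFold2 cs _ _ ⟨rfl, Or.inl ⟨rfl, rfl, rfl, rfl, rfl, rfl⟩⟩)

theorem pvWrongA (cs : List Char) :
    (pvDummyA cs (cs.length + 1) 0 (((cs.length : Nat) : Int) - 1) PySem.Dict.empty).1 =
      pvF cs 0 (((cs.length : Nat) : Int) - 1) :=
  (pvDummyA_F cs (cs.length + 1) 0 _ _ (by omega)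
    (fun p v h => by rw [PySem.Dict.get?_empty] at h; cases h)).1

theorem pvLeafB_ok (cs : List Char) (n : Int) :
    pvMemoOK cs ((PySem.List.pyRange 0 n 2).foldl
      (fun d i => d.insert (i, i) (PySem.Set.ofList [pvDigit cs i])) PySem.Dict.empty) := by
  intro p v hp
  obtain ⟨a, b⟩ := p
  rw [pvLeafB] at hp
  split at hp
  · rename_i hcond
    cases hp
    obtain ⟨hab, _⟩ := hcond
    subst hab
    rw [pvF_eq, if_pos rfl]
  · rw [PySem.Dict.get?_empty] at hp; cases hp

theorem pvWrongB_odd (cs : List Char) (hodd : cs.length % 2 = 1) :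
    (pvDpB cs ((cs.length : Nat) : Int)).getD (0, ((cs.length : Nat) : Int) - 1) PySem.Set.empty =
      pvF cs 0 (((cs.length : Nat) : Int) - 1) := by
  have hinv0 : pvInv cs ((cs.length : Nat) : Int) 2 ((PySem.List.pyRange 0 ((cs.length : Nat) : Int) 2).foldl
      (fun d i => d.insert (i, i) (PySem.Set.ofList [pvDigit cs i])) PySem.Dict.empty) := by
    intro a b ha2 hab2 ha0 hab hbn hL
    have hba : a = b := by omega
    subst hba
    have hmem : a ∈ PySem.List.pyRange 0 ((cs.length : Nat) : Int) 2 := by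
      rw [PySem.List.mem_pyRange_iff_of_pos (by norm_num)]
      exact ⟨ha0, hbn, by simpa using ha2⟩
    rw [pvLeafB, if_pos ⟨rfl, hmem⟩, pvF_eq, if_pos rfl]
  have hfin := pvOuterB cs ((cs.length : Nat) : Int) ((((cs.length : Nat) : Int) - 2).toNat) 2 _
    ⟨1, rfl⟩ (by norm_num) le_rfl (pvLeafB_ok cs _) hinv0
  have hget := hfin 0 (((cs.length : Nat) : Int) - 1) ⟨0, rfl⟩ (by omega) le_rfl (by omega) (by omega) (by omega)
  unfold pvDpB
  exact PySem.Dict.getD_of_get?_eq_some _ _ hget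

-- pvF is empty on every interval of odd difference (the even-length-string case)
theorem pvF_odd (cs : List Char) :
    ∀ (d : Nat) (l r : Int), (r - l).toNat ≤ d → (r - l) % 2 = 1 →
    pvF cs l r = PySem.Set.empty := by
  intro d
  induction d with
  | zero =>
    intro l r hd hpar
    have hlr : r < l := by omega
    rw [pvF_eq, if_neg (by omega), pyRange_two_nil _ _ (by omega), List.foldl_nil]
  | succ d ih =>
    intro l r hd hpar
    by_cases hrl : r < l
    · rw [pvF_eq, if_neg (by omega), pyRange_two_nil _ _ (by omega), List.foldl_nil]
    · rw [pvF_eq, if_neg (by omega)]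
      have hstep : ∀ (acc : PySem.Set Int) (k : Int), k ∈ PySem.List.pyRange (l + 1) r 2 →
          pvComb (PySem.List.pyGetD cs k '?') (pvF cs l (k - 1)) (pvF cs (k + 1) r) acc = acc := by
        intro acc k hk
        have hb := (PySem.List.mem_pyRange_iff_of_pos (by norm_num) k).mp hk
        rw [ih (k + 1) r (by omega) (by omega)]
        unfold pvComb
        simp only [PySem.Set.empty, List.foldl_nil]
        exact PySem.List.foldl_ignore _ _
      rw [PySem.List.foldl_congr_mem _ _ (fun a _ => a) _ hstep, PySem.List.foldl_ignore]

-- ===== VERDICT (by name: the statement is the Claim_ definition above) =====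
theorem scoreOfStudents_spec : Claim_equal_scoreOfStudents := by
  intro s answers _ hpre
  unfold Spec_scoreOfStudents
  simp only [scoreOfStudents, scoreOfStudents_alt]
  have hclen : PySem.Chars.len s.toList = ((s.toList.length : Nat) : Int) := by
    simp [PySem.Chars.len_eq]
  rcases hpre with hv | ⟨heven, _⟩
  · have hodd := pvValid_len s.toList hv
    rw [hclen, pvCorrect_eq, pvWrongA,
      if_pos (by omega : ((s.toList.length : Nat) : Int) % 2 = 1),
      pvWrongB_odd s.toList hodd]
  · rw [hclen, pvCorrect_eq, pvWrongA,
      if_neg (by omega : ¬ ((s.toList.length : Nat) : Int) % 2 = 1),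
      pvF_odd s.toList ((((s.toList.length : Nat) : Int) - 1).toNat) 0 _ (by omega) (by omega)]
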